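-- pv_equiv track=rewrite | github.com/m-jahn/snakemake-workflow-catalog | source/build_wf_pages.py | check_readme
-- ===== SOURCE A (Python) =====
-- def check_readme(readme):
--     clean_readme = []
--     readme_split = readme.split("\n")
--     code_block = False
--     for i, j in zip(readme_split, range(0, len(readme_split))):
--         if i.startswith("```"):
--             code_block = not code_block
--         if i.startswith("# ") and not code_block:
--             clean_readme += [i.replace("# ", "## ")]
--         else:
--             clean_readme += [i]
--     return "\n".join(clean_readme)
-- ===== SOURCE B (Python) =====
-- def check_readme(readme):
--     # Group the lines into fence-delimited segments: segment 0 is everything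
--     # before the first ``` line; each later segment starts with its ``` line.
--     segments = [[]]
--     for line in readme.split("\n"):
--         if line.startswith("```"):
--             segments.append([line])
--         else:
--             segments[-1].append(line)
--     # Odd-numbered segments lie inside a code block; demote headers elsewhere.
--     out = []
--     for k, seg in enumerate(segments):
--         if k % 2 == 0:
--             out += [l.replace("# ", "## ") if l.startswith("# ") else l for l in seg]
--         else:
--             out += seg
--     return "\n".join(out)
-- ===== Notes on version B (the rewrite author's own statement) =====
-- stated objective: alternative
-- what changed: Instead of A's single pass with a code_block toggle, B groups the lines into fence-delimited segments (a nested-list structure, each segment opened by a fence line) and then demotes top-level headers in the even-numbered segments only, copying odd (inside-code) segments verbatim.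
import Mathlib
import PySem

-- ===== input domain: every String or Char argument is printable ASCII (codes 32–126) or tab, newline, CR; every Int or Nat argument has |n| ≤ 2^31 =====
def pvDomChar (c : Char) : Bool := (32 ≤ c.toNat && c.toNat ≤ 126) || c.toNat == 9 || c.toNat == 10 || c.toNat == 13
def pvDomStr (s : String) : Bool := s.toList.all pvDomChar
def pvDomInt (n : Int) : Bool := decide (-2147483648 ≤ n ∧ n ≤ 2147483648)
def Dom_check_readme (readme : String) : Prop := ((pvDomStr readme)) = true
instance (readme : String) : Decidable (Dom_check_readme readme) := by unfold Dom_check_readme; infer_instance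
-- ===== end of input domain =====

-- B groups the lines into fence-delimited segments and demotes headers in the
-- even-numbered (outside-code) segments: a different decomposition, same cost.

-- ===== PORT A =====
-- loop body of A: toggle code_block on fence lines, then demote '# ' headers outside code blocks
def aStep (st : List String × Bool) (p : String × Int) : List String × Bool :=
  let cb := if PySem.Str.startswith p.1 "```" then !st.2 else st.2
  if PySem.Str.startswith p.1 "# " && !cb then
    (st.1 ++ [PySem.Str.replace p.1 "# " "## "], cb)
  else
    (st.1 ++ [p.1], cb)

def check_readme (readme : String) : String :=
  let readme_split := (PySem.Str.split? readme "\n").getD []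
  let r := (List.zip readme_split
      (PySem.List.pyRange 0 (readme_split.length : Int) 1)).foldl aStep ([], false)
  PySem.Str.join "\n" r.1

-- ===== PORT B =====
-- B pass 1 loop body: start a new segment at a fence line, else extend the last segment
def bGroup (segs : List (List String)) (line : String) : List (List String) :=
  if PySem.Str.startswith line "```" then segs ++ [[line]]
  else segs.dropLast ++ [(segs.getLast?.getD []) ++ [line]]

-- B's per-line rewrite used on even segments
def bDemote (l : String) : String :=
  if PySem.Str.startswith l "# " then PySem.Str.replace l "# " "## " else l

-- B pass 2 loop body: demote headers in even-numbered segments, copy odd ones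
def bOut (out : List String) (p : Int × List String) : List String :=
  if PySem.Int.mod p.1 2 == 0 then out ++ p.2.map bDemote else out ++ p.2

def check_readme_alt (readme : String) : String :=
  let segments := ((PySem.Str.split? readme "\n").getD []).foldl bGroup [[]]
  let out := (PySem.List.enumerate segments 0).foldl bOut []
  PySem.Str.join "\n" out

-- ===== PRECONDITION & SPEC =====
def Spec_check_readme (readme : String) (out : String) : Prop := out = check_readme_alt readme
instance (readme : String) (out : String) : Decidable (Spec_check_readme readme out) := by unfold Spec_check_readme; infer_instance

-- ===== CLAIM (what is proved, stated in full; the proofs are below) =====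
def Claim_equal_check_readme : Prop := ∀ (readme : String), Dom_check_readme readme → Spec_check_readme readme (check_readme readme)

-- ===== LEMMAS AND PROOFS =====

-- A's loop as a structural recursion (proof-only characterisation of A)
def goA : List String → Bool → List String
  | [], _ => []
  | l :: ls, b =>
    let b' := if PySem.Str.startswith l "```" then !b else b
    (if PySem.Str.startswith l "# " && !b' then PySem.Str.replace l "# " "## " else l) :: goA ls b'

-- proof-only characterisation of B's pass 1: the segment decomposition, built from the right
def splitSegs : List String → List (List String)
  | [] => [[]]
  | l :: ls =>
    match splitSegs ls with
    | [] => [[l]]          -- unreachable: splitSegs never returns []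
    | s :: ss => if PySem.Str.startswith l "```" then [] :: (l :: s) :: ss else (l :: s) :: ss

-- proof-only characterisation of B's pass 2: alternate transform, t = "outside code"
def flattenAlt : List (List String) → Bool → List String
  | [], _ => []
  | s :: ss, t => (if t then s.map bDemote else s) ++ flattenAlt ss (!t)

lemma splitSegs_ne_nil (ls : List String) : splitSegs ls ≠ [] := by
  cases ls with
  | nil => simp [splitSegs]
  | cons l ls =>
    simp only [splitSegs]
    cases splitSegs ls with
    | nil => simp
    | cons s ss =>
      by_cases h : PySem.Chars.startswith l.toList ['`', '`', '`'] = true <;>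
        simp [h]

lemma fence_not_header (l : String)
    (h : PySem.Chars.startswith l.toList ['`', '`', '`'] = true) :
    PySem.Chars.startswith l.toList ['#', ' '] = false := by
  rw [PySem.Chars.startswith_iff] at h
  by_contra hc
  rw [Bool.not_eq_false, PySem.Chars.startswith_iff] at hc
  obtain ⟨t1, h1⟩ := h
  obtain ⟨t2, h2⟩ := hc
  rw [← h2] at h1
  simp at h1

lemma bDemote_fence (l : String)
    (h : PySem.Chars.startswith l.toList ['`', '`', '`'] = true) :
    bDemote l = l := by
  simp [bDemote, fence_not_header l h]

lemma lemA (ls : List String) : ∀ (k : Int) (acc : List String) (b : Bool),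
    ((List.zip ls (PySem.List.pyRange k (k + (ls.length : Int)) 1)).foldl aStep (acc, b)).1
      = acc ++ goA ls b := by
  induction ls with
  | nil => intro k acc b; simp [goA]
  | cons l ls ih =>
    intro k acc b
    have hk : k < k + ((l :: ls).length : Int) := by simp
    rw [PySem.List.pyRange_one_cons hk]
    have hlen : k + ((l :: ls).length : Int) = (k + 1) + (ls.length : Int) := by
      rw [List.length_cons]; push_cast; ring
    rw [hlen, List.zip_cons_cons, List.foldl_cons]
    have hstep : aStep (acc, b) (l, k)
        = (acc ++ [if PySem.Str.startswith l "# "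
              && !(if PySem.Str.startswith l "```" then !b else b)
            then PySem.Str.replace l "# " "## " else l],
           if PySem.Str.startswith l "```" then !b else b) := by
      unfold aStep
      by_cases hc : (PySem.Str.startswith l "# "
          && !(if PySem.Str.startswith l "```" then !b else b)) = true
      · rw [if_pos hc, if_pos hc]
      · rw [if_neg hc, if_neg hc]
    rw [hstep, ih (k + 1)]
    simp [goA, List.append_assoc]

lemma lemGroup (ls : List String) : ∀ (pre : List (List String)) (cur : List String),
    ls.foldl bGroup (pre ++ [cur])
      = pre ++ (cur ++ (splitSegs ls).headI) :: (splitSegs ls).tail := by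
  induction ls with
  | nil => intro pre cur; simp [splitSegs]
  | cons l ls ih =>
    intro pre cur
    obtain ⟨s, ss, hs⟩ := List.exists_cons_of_ne_nil (splitSegs_ne_nil ls)
    rw [List.foldl_cons]
    by_cases hf : PySem.Chars.startswith l.toList ['`', '`', '`'] = true
    · have hb : bGroup (pre ++ [cur]) l = (pre ++ [cur]) ++ [[l]] := by
        simp [bGroup, hf]
      rw [hb, List.append_assoc, ← List.singleton_append, ← List.append_assoc, ih]
      simp [splitSegs, hs, hf]
    · have hb : bGroup (pre ++ [cur]) l = pre ++ [cur ++ [l]] := by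
        simp [bGroup, hf]
      rw [hb, ih]
      simp [splitSegs, hs, hf]

lemma lemAlt (ls : List String) : ∀ (t : Bool),
    flattenAlt (splitSegs ls) t = goA ls (!t) := by
  induction ls with
  | nil => intro t; cases t <;> simp [splitSegs, flattenAlt, goA]
  | cons l ls ih =>
    intro t
    obtain ⟨s, ss, hs⟩ := List.exists_cons_of_ne_nil (splitSegs_ne_nil ls)
    by_cases hfS : PySem.Str.startswith l "```" = true
    · have hf : PySem.Chars.startswith l.toList ['`', '`', '`'] = true := by simpa using hfS
      have hgoA : goA (l :: ls) (!t) = l :: goA ls t := by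
        simp [goA, hf, fence_not_header l hf]
      have hrec : flattenAlt (s :: ss) (!t) = goA ls t := by
        have := ih (!t); rw [hs] at this; simpa using this
      rw [hgoA, ← hrec]
      simp only [splitSegs, hs]
      rw [if_pos hfS]
      cases t <;> simp [flattenAlt, bDemote_fence l hf]
    · have hf' : PySem.Chars.startswith l.toList ['`', '`', '`'] = false := by
        simpa using hfS
      have hrec : flattenAlt (s :: ss) t = goA ls (!t) := by
        have := ih t; rw [hs] at this; exact this
      have hgoA : goA (l :: ls) (!t)
          = (if t then bDemote l else l) :: goA ls (!t) := by
        cases t <;> cases hh : PySem.Chars.startswith l.toList ['#', ' '] <;>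
          simp [goA, hf', bDemote, hh]
      rw [hgoA, ← hrec]
      simp only [splitSegs, hs]
      rw [if_neg hfS]
      cases t <;> simp [flattenAlt]

lemma mod_flip (k : Int) :
    (PySem.Int.mod (k + 1) 2 == 0) = !(PySem.Int.mod k 2 == 0) := by
  rw [PySem.Int.mod_eq_emod_of_pos (by norm_num : (0:Int) < 2),
      PySem.Int.mod_eq_emod_of_pos (by norm_num : (0:Int) < 2)]
  have h : k % 2 = 0 ∨ k % 2 = 1 := by omega
  rcases h with h | h
  · have h1 : (k + 1) % 2 = 1 := by omega
    simp [h, h1]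
  · have h1 : (k + 1) % 2 = 0 := by omega
    simp [h, h1]

lemma lemEnum (segs : List (List String)) : ∀ (k : Int) (out : List String),
    (PySem.List.enumerate segs k).foldl bOut out
      = out ++ flattenAlt segs (PySem.Int.mod k 2 == 0) := by
  induction segs with
  | nil => intro k out; simp [PySem.List.enumerate_nil, flattenAlt]
  | cons s ss ih =>
    intro k out
    rw [PySem.List.enumerate_cons, List.foldl_cons, ih (k + 1), mod_flip]
    have h : k % 2 = 0 ∨ k % 2 = 1 := by omega
    rcases h with h | h <;> simp [bOut, flattenAlt, h]

-- ===== VERDICT (by name: the statement is the Claim_ definition above) =====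
theorem check_readme_spec : Claim_equal_check_readme := by
  intro readme _
  show check_readme readme = check_readme_alt readme
  simp only [check_readme, check_readme_alt]
  refine congrArg (PySem.Str.join "\n") ?_
  set ls := (PySem.Str.split? readme "\n").getD [] with hls
  have hA := lemA ls 0 [] false
  rw [zero_add] at hA
  rw [hA]
  have hB := lemGroup ls [] []
  simp only [List.nil_append] at hB
  rw [hB, List.nil_append]
  have hcons : (splitSegs ls).headI :: (splitSegs ls).tail = splitSegs ls := by
    obtain ⟨s, ss, hs⟩ := List.exists_cons_of_ne_nil (splitSegs_ne_nil ls)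
    rw [hs]; rfl
  rw [hcons, lemEnum (splitSegs ls) 0 []]
  have h0 : (PySem.Int.mod 0 2 == 0) = true := by decide
  rw [h0, List.nil_append, lemAlt ls true]
  rfl
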